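-- pv_equiv track=rewrite | github.com/YapheeetS/event-extraction | Preprocess.py | generate_trigger_candidate_pos_list
-- ===== SOURCE A (Python) =====
-- def generate_trigger_candidate_pos_list(trigger_pos, entity_pos, subtasktype):
--     cand_list = []
--     idx_list = []
--     for idx,el in enumerate(trigger_pos):
--         if el!='*': idx_list.append((idx,el))
--
--     assert len(entity_pos)==len(trigger_pos)
--
--     for idx in range(len(trigger_pos)):
--         marks = ['A' for i in range(len(trigger_pos))]
--         marks[idx]='B'
--         label = 'None'
--         for i in idx_list:
--             if idx == i[0]:
--                 label = i[1] if subtasktype=='CLASSIFICATION' else 'TRIGGER'  # else: Identification case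
--         cand_list.append([marks,label])
--     return cand_list
-- ===== SOURCE B (Python) =====
-- def generate_trigger_candidate_pos_list(trigger_pos, entity_pos, subtasktype):
--     assert len(entity_pos) == len(trigger_pos)
--     cand_list = []
--     prefix = []
--     suffix = ['A'] * len(trigger_pos)
--     for el in trigger_pos:
--         suffix = suffix[1:]
--         if el == '*':
--             label = 'None'
--         elif subtasktype == 'CLASSIFICATION':
--             label = el
--         else:
--             label = 'TRIGGER'
--         cand_list.append([prefix + ['B'] + suffix, label])
--         prefix = prefix + ['A']
--     return cand_list
-- ===== Notes on version B (the rewrite author's own statement) =====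
-- stated objective: alternative
-- what changed: Replaces A's idx_list precompute pass and per-row inner scan (plus building each row by comprehension and index assignment) with a zipper-style single loop that maintains a growing 'A' prefix and a shrinking 'A' suffix, forming each row as prefix + ['B'] + suffix and deriving the label directly from the current element.
import Mathlib
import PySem

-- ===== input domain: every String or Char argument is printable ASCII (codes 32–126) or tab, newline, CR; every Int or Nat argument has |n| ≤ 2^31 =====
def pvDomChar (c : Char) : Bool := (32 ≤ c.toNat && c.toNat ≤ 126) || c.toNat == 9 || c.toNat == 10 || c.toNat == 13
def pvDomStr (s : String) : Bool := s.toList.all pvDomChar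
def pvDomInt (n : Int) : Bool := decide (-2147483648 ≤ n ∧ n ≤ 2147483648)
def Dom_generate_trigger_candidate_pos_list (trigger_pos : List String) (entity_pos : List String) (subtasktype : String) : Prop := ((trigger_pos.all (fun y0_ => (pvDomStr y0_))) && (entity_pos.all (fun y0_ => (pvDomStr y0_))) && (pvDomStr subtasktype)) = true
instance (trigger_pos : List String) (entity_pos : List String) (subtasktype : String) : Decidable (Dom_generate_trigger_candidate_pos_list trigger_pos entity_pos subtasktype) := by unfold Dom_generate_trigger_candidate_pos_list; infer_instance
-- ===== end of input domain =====

-- B replaces A's idx_list precompute + per-row inner scan and index assignment by a zipper loop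
-- keeping a growing 'A' prefix and shrinking 'A' suffix (objective: alternative decomposition).
-- ===== PORT A =====
def generate_trigger_candidate_pos_list (trigger_pos : List String) (entity_pos : List String) (subtasktype : String) : List (List String × String) :=
  let cand_list : List (List String × String) := []
  let idx_list : List (Int × String) :=
    (PySem.List.enumerate trigger_pos).foldl
      (fun acc p => if p.2 ≠ "*" then acc ++ [p] else acc) []
  -- assert len(entity_pos)==len(trigger_pos): raises outside Pre_
  (PySem.List.pyRange 0 trigger_pos.length 1).foldl
    (fun cand idx =>
      let marks := (PySem.List.pyRange 0 trigger_pos.length 1).map (fun _ => "A")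
      let marks := PySem.List.pySetD marks idx "B"
      let label := idx_list.foldl
        (fun lab i => if idx = i.1 then (if subtasktype = "CLASSIFICATION" then i.2 else "TRIGGER") else lab)
        "None"
      cand ++ [(marks, label)]) cand_list

-- ===== PORT B =====
def generate_trigger_candidate_pos_list_alt (trigger_pos : List String) (entity_pos : List String) (subtasktype : String) : List (List String × String) :=
  -- assert len(entity_pos)==len(trigger_pos): raises outside Pre_
  (trigger_pos.foldl
    (fun (st : List (List String × String) × List String × List String) el =>
      let suffix := PySem.List.slice st.2.2 (some 1) none
      let label := if el = "*" then "None"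
                   else if subtasktype = "CLASSIFICATION" then el else "TRIGGER"
      (st.1 ++ [(st.2.1 ++ ["B"] ++ suffix, label)], st.2.1 ++ ["A"], suffix))
    (([], [], List.replicate trigger_pos.length "A"))).1

-- ===== PRECONDITION & SPEC =====
-- the assert: A raises AssertionError unless the two lists have equal length
def Pre_generate_trigger_candidate_pos_list (trigger_pos : List String) (entity_pos : List String) (subtasktype : String) : Prop :=
  entity_pos.length = trigger_pos.length
instance (trigger_pos : List String) (entity_pos : List String) (subtasktype : String) : Decidable (Pre_generate_trigger_candidate_pos_list trigger_pos entity_pos subtasktype) := by unfold Pre_generate_trigger_candidate_pos_list; infer_instance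
def pvWitness_generate_trigger_candidate_pos_list : List String × List String × String := (["*", "Attack"], ["O", "O"], "CLASSIFICATION")
def Spec_generate_trigger_candidate_pos_list (trigger_pos : List String) (entity_pos : List String) (subtasktype : String) (out : List (List String × String)) : Prop := out = generate_trigger_candidate_pos_list_alt trigger_pos entity_pos subtasktype
instance (trigger_pos : List String) (entity_pos : List String) (subtasktype : String) (out : List (List String × String)) : Decidable (Spec_generate_trigger_candidate_pos_list trigger_pos entity_pos subtasktype out) := by unfold Spec_generate_trigger_candidate_pos_list; infer_instance

-- ===== CLAIM (what is proved, stated in full; the proofs are below) =====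
def Claim_equal_generate_trigger_candidate_pos_list : Prop := ∀ (trigger_pos : List String) (entity_pos : List String) (subtasktype : String), Dom_generate_trigger_candidate_pos_list trigger_pos entity_pos subtasktype → Pre_generate_trigger_candidate_pos_list trigger_pos entity_pos subtasktype → Spec_generate_trigger_candidate_pos_list trigger_pos entity_pos subtasktype (generate_trigger_candidate_pos_list trigger_pos entity_pos subtasktype)

-- ===== LEMMAS AND PROOFS =====

-- intermediate normal form: row k is (replicate n "A").set k "B" with the label read off element k
def pvMid (t : List String) (s : String) : List (List String × String) :=
  (PySem.List.enumerate t).map (fun p =>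
    (PySem.List.pySetD (List.replicate t.length "A") p.1 "B",
     if p.2 = "*" then "None"
     else if s = "CLASSIFICATION" then p.2 else "TRIGGER"))

-- A's last-match scan of an association list whose every hit carries value `el`
lemma label_fold_eq (idx : Int) (V : String → String) (el : String)
    (l : List (Int × String)) (h : ∀ p ∈ l, p.1 = idx → p.2 = el) (acc : String) :
    l.foldl (fun lab i => if idx = i.1 then V i.2 else lab) acc
      = if l.any (fun p => p.1 == idx) then V el else acc := by
  induction l generalizing acc with
  | nil => simp
  | cons p rest ih =>
    simp only [List.foldl_cons, List.any_cons]
    rw [ih (fun q hq => h q (List.mem_cons_of_mem _ hq))]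
    by_cases hp : p.1 = idx
    · have hv := h p List.mem_cons_self hp
      by_cases hr : (rest.any fun q => q.1 == idx) = true
      · simp [hr, hp]
      · simp [hr, hp, hv]
    · have hne : ¬ (idx = p.1) := fun he => hp he.symm
      by_cases hr : (rest.any fun q => q.1 == idx) = true
      · simp [hr]
      · simp [hr, hne, hp]

lemma a_eq_mid (t : List String) (e : List String) (s : String) :
    generate_trigger_candidate_pos_list t e s = pvMid t s := by
  unfold pvMid generate_trigger_candidate_pos_list
  rw [PySem.List.foldl_append_ite_eq_filter, PySem.List.foldl_append_singleton_eq_map,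
      PySem.List.enumerate_eq_map_pyRange (d := ""), List.map_map]
  simp only [List.nil_append]
  apply List.map_congr_left
  intro idx hidx
  rw [PySem.List.mem_pyRange_one] at hidx
  obtain ⟨k, rfl, hk⟩ : ∃ k : Nat, idx = (k : Int) ∧ k < t.length :=
    ⟨idx.toNat, by omega, by omega⟩
  have hmem : (((k : Int), PySem.List.pyGetD t (k : Int) "") ∈
      (PySem.List.pyRange 0 (PySem.List.len t) 1).map (fun j => (j, PySem.List.pyGetD t j ""))) := by
    refine List.mem_map.mpr ⟨(k : Int), ?_, rfl⟩
    rw [PySem.List.mem_pyRange_one]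
    refine ⟨by positivity, ?_⟩
    simp only [PySem.List.len]
    omega
  have hone : ∀ p ∈ ((PySem.List.pyRange 0 (PySem.List.len t) 1).map
        (fun j => (j, PySem.List.pyGetD t j ""))).filter (fun x => decide (x.2 ≠ "*")),
      p.1 = (k : Int) → p.2 = PySem.List.pyGetD t (k : Int) "" := by
    intro p hp hpk
    obtain ⟨j, _, rfl⟩ := List.mem_map.mp (List.mem_filter.mp hp).1
    simp only at hpk
    rw [hpk]
  rw [label_fold_eq ((k : Int)) (fun v => if s = "CLASSIFICATION" then v else "TRIGGER")
        (PySem.List.pyGetD t (k : Int) "") _ hone]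
  have hmarks : (PySem.List.pyRange 0 ((t.length : Int)) 1).map (fun _ => "A")
      = List.replicate t.length "A" := by
    rw [List.map_const']
    simp [PySem.List.length_pyRange_one]
  simp only [Function.comp]
  by_cases hstar : PySem.List.pyGetD t (k : Int) "" = "*"
  · have hany : (((PySem.List.pyRange 0 (PySem.List.len t) 1).map
          (fun j => (j, PySem.List.pyGetD t j ""))).filter (fun x => decide (x.2 ≠ "*"))).any
          (fun p => p.1 == (k : Int)) = false := by
      rw [List.any_eq_false]
      intro p hp
      have h2 := (List.mem_filter.mp hp).2
      intro hpk
      have := hone p hp (by simpa using hpk)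
      simp [this, hstar] at h2
    rw [hany]
    simp [hmarks, hstar]
  · have hany : (((PySem.List.pyRange 0 (PySem.List.len t) 1).map
          (fun j => (j, PySem.List.pyGetD t j ""))).filter (fun x => decide (x.2 ≠ "*"))).any
          (fun p => p.1 == (k : Int)) = true := by
      rw [List.any_eq_true]
      exact ⟨_, List.mem_filter.mpr ⟨hmem, by simpa using hstar⟩, by simp⟩
    rw [hany]
    have hstar' : t[k]?.getD "" ≠ "*" := by simpa using hstar
    simp [hmarks, hstar']

lemma set_replicate (k n : Nat) (hk : k < n) (a b : String) :
    (List.replicate n a).set k b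
      = List.replicate k a ++ b :: List.replicate (n - 1 - k) a := by
  induction k generalizing n with
  | zero =>
    cases n with
    | zero => omega
    | succ m => simp [List.replicate_succ]
  | succ j ih =>
    cases n with
    | zero => omega
    | succ m =>
      simp only [List.replicate_succ, List.set_cons_succ, List.cons_append]
      rw [ih m (by omega)]
      have h : m - 1 - j = m + 1 - 1 - (j + 1) := by omega
      rw [h]

-- invariant of B's zipper loop: prefix = replicate m "A", suffix = replicate (remaining) "A"
lemma alt_loop (s : String) (l : List String) (acc : List (List String × String)) (m : Nat) :
    (l.foldl
      (fun (st : List (List String × String) × List String × List String) el =>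
        let suffix := PySem.List.slice st.2.2 (some 1) none
        let label := if el = "*" then "None"
                     else if s = "CLASSIFICATION" then el else "TRIGGER"
        (st.1 ++ [(st.2.1 ++ ["B"] ++ suffix, label)], st.2.1 ++ ["A"], suffix))
      ((acc, List.replicate m "A", List.replicate l.length "A"))).1
    = acc ++ (l.zipIdx m).map (fun q =>
        (List.replicate q.2 "A" ++ "B" :: List.replicate (m + l.length - 1 - q.2) "A",
         if q.1 = "*" then "None"
         else if s = "CLASSIFICATION" then q.1 else "TRIGGER")) := by
  induction l generalizing acc m with
  | nil => simp
  | cons el tl ih =>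
    simp only [List.foldl_cons, List.length_cons, List.zipIdx_cons, List.map_cons]
    rw [PySem.List.slice_from_one]
    have htail : (List.replicate (tl.length + 1) "A").tail = List.replicate tl.length "A" := by
      simp [List.replicate_succ]
    rw [htail]
    have hpre : List.replicate m "A" ++ ["A"] = List.replicate (m + 1) "A" :=
      (List.replicate_succ' (n := m)).symm
    rw [hpre, ih]
    have h1 : m + (tl.length + 1) - 1 - m = tl.length := by omega
    have h2 : ∀ q2 : Nat, m + 1 + tl.length - 1 - q2 = m + (tl.length + 1) - 1 - q2 := by
      intro q2; omega
    simp only [h1, h2, List.append_assoc, List.singleton_append]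

-- alt_loop at m = 0, the initial state of B's port ([] = replicate 0 "A")
lemma alt_loop0 (s : String) (l : List String) :
    (l.foldl
      (fun (st : List (List String × String) × List String × List String) el =>
        let suffix := PySem.List.slice st.2.2 (some 1) none
        let label := if el = "*" then "None"
                     else if s = "CLASSIFICATION" then el else "TRIGGER"
        (st.1 ++ [(st.2.1 ++ ["B"] ++ suffix, label)], st.2.1 ++ ["A"], suffix))
      (([], [], List.replicate l.length "A"))).1
    = (l.zipIdx).map (fun q =>
        (List.replicate q.2 "A" ++ "B" :: List.replicate (l.length - 1 - q.2) "A",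
         if q.1 = "*" then "None"
         else if s = "CLASSIFICATION" then q.1 else "TRIGGER")) := by
  have h := alt_loop s l [] 0
  simpa using h

lemma mid_eq_alt (t : List String) (e : List String) (s : String) :
    pvMid t s = generate_trigger_candidate_pos_list_alt t e s := by
  unfold pvMid generate_trigger_candidate_pos_list_alt
  rw [alt_loop0, PySem.List.enumerate_eq_zipIdx_map, List.map_map]
  apply List.map_congr_left
  intro q hq
  have hb := List.mem_zipIdx (x := q.1) (i := q.2) hq
  simp only [Function.comp, zero_add]
  rw [PySem.List.pySetD_natCast, set_replicate q.2 t.length (by omega)]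

-- ===== VERDICT (by name: the statement is the Claim_ definition above) =====
theorem generate_trigger_candidate_pos_list_spec : Claim_equal_generate_trigger_candidate_pos_list := by
  intro t e s _ _
  unfold Spec_generate_trigger_candidate_pos_list
  rw [a_eq_mid t e s, mid_eq_alt t e s]
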